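-- pv_equiv track=rewrite | github.com/SerenaFraD/UNI-PA | Argomenti/Design Pattern/Generatori/esercizio2.py | myGeneratorR
-- ===== SOURCE A (Python) =====
-- def myGeneratorR(n, c, p):
--     if n == 1:
--         yield p
--     else:
--         yield p
--         c += 1
--         p = c * p
--         yield from myGeneratorR(n - 1, c, p)
-- ===== SOURCE B (Python) =====
-- def myGeneratorR(n, c, p):
--     acc = p
--     yield acc
--     for m in range(c + 1, c + n):
--         acc *= m
--         yield acc
-- ===== Notes on version B (the rewrite author's own statement) =====
-- stated objective: idiomatic
-- what changed: Replaces the recursive generator (one delegating 'yield from' frame per element) by a flat for-loop over the multiplier range(c+1, c+n) that multiplies a running accumulator, with no mutation of n and no recursion; Pre_ excludes n<1 (A is an infinite generator) and n>9000 (A's recursion raises RecursionError near the interpreter's recursion limit, whose exact cutoff depends on that limit and ambient stack depth).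
import Mathlib
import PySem

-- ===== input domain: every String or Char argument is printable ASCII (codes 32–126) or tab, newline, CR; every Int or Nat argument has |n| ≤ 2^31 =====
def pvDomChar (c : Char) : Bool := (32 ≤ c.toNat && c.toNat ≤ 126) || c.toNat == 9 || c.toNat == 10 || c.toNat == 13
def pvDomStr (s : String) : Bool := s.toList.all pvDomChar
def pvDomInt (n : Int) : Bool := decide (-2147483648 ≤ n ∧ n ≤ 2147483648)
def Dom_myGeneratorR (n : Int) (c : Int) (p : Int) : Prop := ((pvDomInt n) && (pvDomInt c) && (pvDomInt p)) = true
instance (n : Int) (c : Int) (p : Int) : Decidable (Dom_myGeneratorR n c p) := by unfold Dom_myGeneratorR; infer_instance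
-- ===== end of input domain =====

-- B replaces A's recursive generator by a flat for-loop over the multiplier range(c+1, c+n) with a running product.


-- ===== PORT A =====
-- A's recursion: yield p, then recurse with (n-1, c+1, (c+1)*p).  The Python recursion
-- terminates iff n ≥ 1 (exactly Pre_); fuel n.toNat suffices there and is exact on Pre_.
def myGeneratorRGoA (fuel : Nat) (n : Int) (c : Int) (p : Int) : List Int :=
  match fuel with
  | 0 => []
  | f + 1 =>
    if n = 1 then [p]
    else p :: myGeneratorRGoA f (n - 1) (c + 1) ((c + 1) * p)

def myGeneratorR (n : Int) (c : Int) (p : Int) : List Int :=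
  myGeneratorRGoA n.toNat n c p

-- ===== PORT B =====
-- B: acc = p; yield acc; for m in range(c+1, c+n): acc *= m; yield acc.
-- The loop is a foldl over pyRange carrying (acc, yielded values so far).
def myGeneratorRStepB (st : Int × List Int) (m : Int) : Int × List Int :=
  (st.1 * m, st.1 * m :: st.2)

def myGeneratorR_alt (n : Int) (c : Int) (p : Int) : List Int :=
  ((PySem.List.pyRange (c + 1) (c + n) 1).foldl myGeneratorRStepB (p, [p])).2.reverse

-- ===== PRECONDITION & SPEC =====
-- Pre_ excludes n < 1, where the Python generator never terminates (list(A(...)) diverges),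
-- and large n, where A's recursion exceeds the interpreter's recursion limit and raises
-- RecursionError (the exact cutoff depends on the limit and ambient stack depth, so a
-- safety margin below the harness's limit of 10000 is used).
def Pre_myGeneratorR (n : Int) (c : Int) (p : Int) : Prop := 1 ≤ n ∧ n ≤ 9000
instance (n : Int) (c : Int) (p : Int) : Decidable (Pre_myGeneratorR n c p) := by unfold Pre_myGeneratorR; infer_instance
def pvWitness_myGeneratorR : Int × Int × Int := (4, 1, 1)

def Spec_myGeneratorR (n : Int) (c : Int) (p : Int) (out : List Int) : Prop := out = myGeneratorR_alt n c p
instance (n : Int) (c : Int) (p : Int) (out : List Int) : Decidable (Spec_myGeneratorR n c p out) := by unfold Spec_myGeneratorR; infer_instance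

-- ===== CLAIM =====
def Claim_equal_myGeneratorR : Prop := ∀ (n : Int) (c : Int) (p : Int), Dom_myGeneratorR n c p → Pre_myGeneratorR n c p → Spec_myGeneratorR n c p (myGeneratorR n c p)

-- ===== LEMMAS AND PROOFS =====
theorem foldB_eq_goA : ∀ (k : Nat) (c p : Int) (acc : List Int),
    ((PySem.List.pyRange (c + 1) (c + 1 + (k : Int)) 1).foldl myGeneratorRStepB (p, p :: acc)).2.reverse
      = acc.reverse ++ myGeneratorRGoA (k + 1) ((k : Int) + 1) c p := by
  intro k
  induction k with
  | zero =>
    intro c p acc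
    rw [PySem.List.pyRange_one_eq_nil (by omega)]
    simp [myGeneratorRGoA]
  | succ f ih =>
    intro c p acc
    rw [PySem.List.pyRange_one_cons (by push_cast; omega)]
    have h1 : c + 1 + ((f : Int) + 1) = (c + 1) + 1 + (f : Int) := by ring
    push_cast
    rw [h1]
    simp only [List.foldl_cons, myGeneratorRStepB]
    have := ih (c + 1) (p * (c + 1)) (p :: acc)
    rw [this]
    have hne : (f : Int) + 1 + 1 ≠ 1 := by omega
    simp only [myGeneratorRGoA, if_neg hne]
    have : (f : Int) + 1 + 1 - 1 = (f : Int) + 1 := by ring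
    rw [this]
    have : (c + 1) * p = p * (c + 1) := by ring
    rw [this]
    simp

-- ===== VERDICT =====
theorem myGeneratorR_spec : Claim_equal_myGeneratorR := by
  intro n c p _ hpre
  unfold Spec_myGeneratorR myGeneratorR myGeneratorR_alt
  obtain ⟨h1, _⟩ := hpre
  obtain ⟨k, hk⟩ : ∃ k : Nat, n = (k : Int) + 1 := ⟨(n - 1).toNat, by omega⟩
  subst hk
  have hfold := foldB_eq_goA k c p []
  have hc : c + ((k : Int) + 1) = c + 1 + (k : Int) := by ring
  rw [hc, hfold]
  have ht : ((k : Int) + 1).toNat = k + 1 := by omega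
  rw [ht]
  simp
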